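-- pv_equiv track=rewrite | github.com/francesco-source/Multiple-Couriers-Planning-Problem | SMT/src/SMT_utils.py | output_formatting
-- ===== SOURCE A (Python) =====
-- def output_formatting(text, n_items):
--   '''
--   return: objective values and couriers' path
--   '''
--   val = text.split('\n')[0]
--   out_ris = []
--   counter = 0
--   for i in text.split('\n')[1:-1]:
--     if (counter == 0 ):
--         res = []
--     ord =  i.split()[1][:-2]
--     if(ord != str(n_items)):
--         res.append(int(ord))
--         counter = counter + 1
--     else:
--         counter = 0
--         if (res != []):
--             out_ris.append(res)
--
--
--
--   return val, out_ris
-- ===== SOURCE B (Python) =====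
-- def group_tokens(toks, sent):
--     # recursively split at the first sentinel occurrence; an unterminated
--     # trailing group (no sentinel left) is discarded, empty groups dropped
--     if sent not in toks:
--         return []
--     j = toks.index(sent)
--     head = [int(t) for t in toks[:j]]
--     rest = group_tokens(toks[j + 1:], sent)
--     return ([head] if head else []) + rest
--
-- def output_formatting(text, n_items):
--     '''
--     return: objective values and couriers' path
--     '''
--     lines = text.split('\n')
--     toks = [ln.split()[1][:-2] for ln in lines[1:-1]]
--     return lines[0], group_tokens(toks, str(n_items))
-- ===== Notes on version B (the rewrite author's own statement) =====
-- stated objective: alternative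
-- what changed: Replaces A's single stateful accumulate-and-flush loop (counter flag, running res list) by a staged parse pass followed by a recursive divide-at-first-sentinel splitter: group_tokens finds the first sentinel with list.index, slices off the head group, and recurses on the remainder, so no mutable group accumulator exists.
import Mathlib
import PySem

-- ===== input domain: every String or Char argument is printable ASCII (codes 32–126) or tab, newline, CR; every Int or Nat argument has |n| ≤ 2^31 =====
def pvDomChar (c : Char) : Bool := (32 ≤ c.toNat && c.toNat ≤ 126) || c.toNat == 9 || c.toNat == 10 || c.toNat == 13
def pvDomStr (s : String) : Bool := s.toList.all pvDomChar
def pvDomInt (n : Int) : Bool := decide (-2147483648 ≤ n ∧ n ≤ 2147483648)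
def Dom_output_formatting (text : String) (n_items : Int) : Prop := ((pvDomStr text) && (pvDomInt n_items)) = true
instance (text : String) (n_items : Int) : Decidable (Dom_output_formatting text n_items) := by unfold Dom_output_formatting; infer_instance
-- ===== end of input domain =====

-- B replaces A's stateful accumulate-and-flush loop by a staged parse pass plus a
-- recursive divide-at-first-sentinel splitter; objective: alternative.

-- ===== PORT A =====
-- A's for-loop over the middle lines, state (out_ris, counter, res); 'none' = the Python raises
-- (IndexError from i.split()[1], ValueError from int(ord)) — those inputs are excluded by Pre_.
def pvALoop (n_items : Int) : List String → List (List Int) → Nat → List Int → Option (List (List Int))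
  | [], out, _, _ => some out
  | i :: rest, out, counter, res =>
    let res := if counter == 0 then [] else res
    match PySem.List.pyGet? (PySem.Str.split₀ i) 1 with
    | none => none                                -- i.split()[1] : IndexError
    | some w =>
      let ord := PySem.Str.slice w none (some (-2))   -- [:-2]
      if ord ≠ PySem.Int.toStr n_items then
        match PySem.Int.ofStr? ord with
        | none => none                            -- int(ord) : ValueError
        | some v => pvALoop n_items rest out (counter + 1) (res ++ [v])
      else
        pvALoop n_items rest (if res ≠ [] then out ++ [res] else out) 0 res

def output_formatting (text : String) (n_items : Int) : String × List (List Int) :=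
  let lines := (PySem.Str.split? text "\n").getD []   -- sep ≠ "", so split? is some
  let val := lines.headD ""                           -- text.split('\n')[0]: split is never empty
  (val, (pvALoop n_items (PySem.List.slice lines (some 1) (some (-1))) [] 0 []).getD [])

-- ===== PORT B =====
-- Source B's parse pass: [ln.split()[1][:-2] for ln in lines[1:-1]]; none = IndexError
def pvBParse (lines : List String) : Option (List String) :=
  lines.mapM (fun ln =>
    (PySem.List.pyGet? (PySem.Str.split₀ ln) 1).map
      (fun w => PySem.Str.slice w none (some (-2))))

-- Source B's group_tokens: split at the first sentinel with .index, recurse on the remainder;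
-- none = ValueError from int(t) in the head comprehension (excluded by Pre_).
def pvGroupTokens (toks : List String) (sent : String) : Option (List (List Int)) :=
  if sent ∈ toks then
    match PySem.List.index? toks sent with
    | none => some []   -- unreachable: sent ∈ toks
    | some j =>
      match (PySem.List.slice toks none (some (j : Int))).mapM PySem.Int.ofStr? with   -- toks[:j]
      | none => none
      | some head =>
        match pvGroupTokens (PySem.List.slice toks (some ((j : Int) + 1)) none) sent with   -- toks[j+1:]
        | none => none
        | some rest => some ((if head ≠ [] then [head] else []) ++ rest)
  else some []
termination_by toks.length
decreasing_by
  rename_i hmem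
  have hne : toks ≠ [] := by rintro rfl; simp at hmem
  have : ((j : Int) + 1) = ((j + 1 : Nat) : Int) := by push_cast; ring
  rw [this, PySem.List.slice_from_natCast]
  have : 0 < toks.length := List.length_pos_iff.mpr hne
  simp [List.length_drop]; omega

def output_formatting_alt (text : String) (n_items : Int) : String × List (List Int) :=
  let lines := (PySem.Str.split? text "\n").getD []   -- sep ≠ "", so split? is some
  match pvBParse (PySem.List.slice lines (some 1) (some (-1))) with
  | none => (lines.headD "", [])   -- unreachable under Pre_ (Source B raises here)
  | some toks =>
      (lines.headD "", (pvGroupTokens toks (PySem.Int.toStr n_items)).getD [])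

-- ===== PRECONDITION & SPEC =====
-- Pre_ excludes exactly the inputs on which Python A raises: a middle line with fewer than two
-- whitespace tokens (IndexError) or whose token is neither the sentinel nor an int literal (ValueError).
def Pre_output_formatting (text : String) (n_items : Int) : Prop :=
  ((PySem.List.slice ((PySem.Str.split? text "\n").getD []) (some 1) (some (-1))).all
    (fun ln =>
      match PySem.List.pyGet? (PySem.Str.split₀ ln) 1 with
      | none => false
      | some w =>
        let tok := PySem.Str.slice w none (some (-2))
        tok == PySem.Int.toStr n_items || (PySem.Int.ofStr? tok).isSome)) = true
instance (text : String) (n_items : Int) : Decidable (Pre_output_formatting text n_items) := by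
  unfold Pre_output_formatting; infer_instance

def pvWitness_output_formatting : String × Int :=
  ("5\nCourier 2,,\nCourier 3,,\nend", 3)

def Spec_output_formatting (text : String) (n_items : Int) (out : String × List (List Int)) : Prop := out = output_formatting_alt text n_items
instance (text : String) (n_items : Int) (out : String × List (List Int)) : Decidable (Spec_output_formatting text n_items out) := by unfold Spec_output_formatting; infer_instance

-- ===== CLAIM (what is proved, stated in full; the proofs are below) =====
def Claim_equal_output_formatting : Prop := ∀ (text : String) (n_items : Int), Dom_output_formatting text n_items → Pre_output_formatting text n_items → Spec_output_formatting text n_items (output_formatting text n_items)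

-- ===== LEMMAS AND PROOFS =====

-- the single token parsed from a line
def pvTok (ln : String) : Option String :=
  (PySem.List.pyGet? (PySem.Str.split₀ ln) 1).map
    (fun w => PySem.Str.slice w none (some (-2)))

-- parsed value under the hypothesis the token parses
def pvParseD (t : String) : Int := (PySem.Int.ofStr? t).getD 0

-- spec-level sequential grouping both programs are compared against
def pvK (sent : String) : List Int → List String → List (List Int)
  | _, [] => []
  | cur, t :: rest =>
    if t = sent then (if cur ≠ [] then [cur] else []) ++ pvK sent [] rest
    else pvK sent (cur ++ [pvParseD t]) rest

-- hypothesis: every token is the sentinel or parses as an int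
def pvGood (sent : String) (toks : List String) : Prop :=
  ∀ t ∈ toks, t = sent ∨ (PySem.Int.ofStr? t).isSome = true

lemma pvBParse_cons (l : String) (ls : List String) :
    pvBParse (l :: ls) = (pvTok l).bind (fun t => (pvBParse ls).map (t :: ·)) := by
  unfold pvBParse pvTok
  rw [List.mapM_cons]
  cases PySem.List.pyGet? (PySem.Str.split₀ l) 1 with
  | none => simp
  | some w =>
    cases h : List.mapM (fun ln =>
        Option.map (fun w => PySem.Str.slice w none (some (-2)))
          (PySem.List.pyGet? (PySem.Str.split₀ ln) 1)) ls <;> simp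

-- A's loop equals (parse pass) then (sequential grouping pvK-style loop on the tokens)
lemma pvKey (n_items : Int) (ls : List String)
    (hpre : ∀ ln ∈ ls, match PySem.List.pyGet? (PySem.Str.split₀ ln) 1 with
      | none => False
      | some w =>
        let tok := PySem.Str.slice w none (some (-2))
        tok = PySem.Int.toStr n_items ∨ (PySem.Int.ofStr? tok).isSome = true) :
    ∀ (out : List (List Int)) (counter : Nat) (res : List Int),
      pvALoop n_items ls out counter res =
        (pvBParse ls).map (fun toks =>
          out ++ pvK (PySem.Int.toStr n_items) (if counter == 0 then [] else res) toks) := by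
  induction ls with
  | nil => intro out counter res; simp [pvALoop, pvBParse, pvK]
  | cons l rest ih =>
    intro out counter res
    have hl := hpre l (by simp)
    have hrest := fun ln hln => hpre ln (List.mem_cons_of_mem _ hln)
    cases hg : PySem.List.pyGet? (PySem.Str.split₀ l) 1 with
    | none => simp [hg] at hl
    | some w =>
      simp only [hg] at hl
      rw [pvBParse_cons]
      have htok : pvTok l = some (PySem.Str.slice w none (some (-2))) := by
        simp [pvTok, hg]
      rw [htok]
      by_cases hs : PySem.Str.slice w none (some (-2)) = PySem.Int.toStr n_items
      · simp only [pvALoop, hg, hs]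
        rw [ih hrest]
        cases hp : pvBParse rest with
        | none => simp
        | some toks =>
          simp [pvK]
          split_ifs <;> simp
      · rcases hl with hl | hl
        · exact absurd hl hs
        · rcases Option.isSome_iff_exists.mp hl with ⟨v, hv⟩
          simp only [pvALoop, hg, if_pos hs, hv]
          rw [ih hrest]
          cases hp : pvBParse rest with
          | none => simp
          | some toks =>
            have hpd : pvParseD (PySem.Str.slice w none (some (-2))) = v := by
              simp [pvParseD, hv]
            by_cases hc : counter == 0 <;> simp [pvK, hs, hc, hpd]

lemma pvK_append_no_sent (sent : String) (seg : List String)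
    (hseg : ∀ t ∈ seg, t ≠ sent) :
    ∀ (cur : List Int) (rest : List String),
      pvK sent cur (seg ++ rest) = pvK sent (cur ++ seg.map pvParseD) rest := by
  induction seg with
  | nil => intro cur rest; simp
  | cons t seg ih =>
    intro cur rest
    have ht := hseg t (by simp)
    simp only [List.cons_append, pvK, if_neg ht]
    rw [ih (fun t ht' => hseg t (List.mem_cons_of_mem _ ht'))]
    simp

lemma pvK_no_sent (sent : String) (toks : List String) (h : sent ∉ toks) (cur : List Int) :
    pvK sent cur toks = [] := by
  induction toks generalizing cur with
  | nil => simp [pvK]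
  | cons t rest ih =>
    have : t ≠ sent := by rintro rfl; simp at h
    simp only [pvK, if_neg this]
    exact ih (fun hm => h (List.mem_cons_of_mem _ hm)) _

lemma mapM_of_good (seg : List String) (h : ∀ t ∈ seg, (PySem.Int.ofStr? t).isSome = true) :
    seg.mapM PySem.Int.ofStr? = some (seg.map pvParseD) := by
  induction seg with
  | nil => simp
  | cons t seg ih =>
    have ht := h t (by simp)
    rcases Option.isSome_iff_exists.mp ht with ⟨v, hv⟩
    rw [List.mapM_cons, ih (fun t ht' => h t (List.mem_cons_of_mem _ ht'))]
    simp [hv, pvParseD]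

-- B's recursive splitter equals the sequential grouping, on good token lists
lemma pvGroupTokens_eq_K (sent : String) (toks : List String) (hg : pvGood sent toks) :
    pvGroupTokens toks sent = some (pvK sent [] toks) := by
  induction toks using (measure List.length).wf.induction with
  | _ toks ih =>
    by_cases hmem : sent ∈ toks
    · have hj := (PySem.List.index?_isSome_iff toks sent).mpr hmem
      rcases Option.isSome_iff_exists.mp hj with ⟨j, hjeq⟩
      rcases (PySem.List.index?_eq_some_iff toks sent j).mp hjeq with ⟨pre, suf, hsplit, hlen, hnotpre⟩
      have hslice1 : PySem.List.slice toks none (some (j : Int)) = pre := by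
        rw [PySem.List.slice_to_natCast, hsplit, ← hlen]
        simp
      have hslice2 : PySem.List.slice toks (some ((j : Int) + 1)) none = suf := by
        have : ((j : Int) + 1) = ((j + 1 : Nat) : Int) := by push_cast; ring
        rw [this, PySem.List.slice_from_natCast, hsplit, ← hlen]
        simp
      have hpre_good : ∀ t ∈ pre, (PySem.Int.ofStr? t).isSome = true := by
        intro t ht
        rcases hg t (by rw [hsplit]; exact List.mem_append_left _ ht) with h | h
        · exact absurd (h ▸ ht) hnotpre
        · exact h
      have hsuf_good : pvGood sent suf := fun t ht =>
        hg t (by rw [hsplit]; exact List.mem_append_right _ (List.mem_cons_of_mem _ ht))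
      have hsuf_lt : suf.length < toks.length := by
        rw [hsplit]; simp; omega
      unfold pvGroupTokens
      rw [if_pos hmem, hjeq]
      simp only [hslice1, hslice2, mapM_of_good pre hpre_good, ih suf hsuf_lt hsuf_good]
      have hK : pvK sent [] toks = (if pre.map pvParseD ≠ [] then [pre.map pvParseD] else []) ++ pvK sent [] suf := by
        rw [hsplit, pvK_append_no_sent sent pre (fun t ht => by rintro rfl; exact hnotpre ht)]
        simp [pvK]
      rw [hK]
    · unfold pvGroupTokens
      rw [if_neg hmem, pvK_no_sent sent toks hmem]

lemma pre_to_forall (text : String) (n_items : Int)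
    (h : Pre_output_formatting text n_items) :
    ∀ ln ∈ PySem.List.slice ((PySem.Str.split? text "\n").getD []) (some 1) (some (-1)),
      match PySem.List.pyGet? (PySem.Str.split₀ ln) 1 with
      | none => False
      | some w =>
        let tok := PySem.Str.slice w none (some (-2))
        tok = PySem.Int.toStr n_items ∨ (PySem.Int.ofStr? tok).isSome = true := by
  unfold Pre_output_formatting at h
  rw [List.all_eq_true] at h
  intro ln hln
  have := h ln hln
  cases hg : PySem.List.pyGet? (PySem.Str.split₀ ln) 1 <;> simp [hg] at this ⊢
  · rcases this with h1 | h1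
    · exact Or.inl h1
    · exact Or.inr h1

lemma pvBParse_mem (ls : List String) (toks : List String) (h : pvBParse ls = some toks) :
    ∀ t ∈ toks, ∃ ln ∈ ls, pvTok ln = some t := by
  induction ls generalizing toks with
  | nil =>
    simp [pvBParse] at h
    subst h; simp
  | cons l rest ih =>
    rw [pvBParse_cons] at h
    cases htok : pvTok l with
    | none => simp [htok] at h
    | some t0 =>
      rw [htok] at h
      cases hp : pvBParse rest with
      | none => simp [hp] at h
      | some toks' =>
        rw [hp] at h
        simp at h
        subst h
        intro t ht
        rcases List.mem_cons.mp ht with rfl | ht'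
        · exact ⟨l, by simp, htok⟩
        · rcases ih toks' hp t ht' with ⟨ln, hln, htok'⟩
          exact ⟨ln, List.mem_cons_of_mem _ hln, htok'⟩

-- ===== VERDICT (by name: the statement is the Claim_ definition above) =====
theorem output_formatting_spec : Claim_equal_output_formatting := by
  intro text n_items _ hpre
  unfold Spec_output_formatting output_formatting output_formatting_alt
  have hforall := pre_to_forall text n_items hpre
  have hkey := pvKey n_items _ hforall [] 0 []
  cases hp : pvBParse (PySem.List.slice ((PySem.Str.split? text "\n").getD []) (some 1) (some (-1))) with
  | none =>
    exfalso
    -- Pre_ rules out a parse failure: some line has no second word, contradiction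
    revert hp
    have : ∀ (ls : List String),
        (∀ ln ∈ ls, match PySem.List.pyGet? (PySem.Str.split₀ ln) 1 with
          | none => False
          | some w =>
            let tok := PySem.Str.slice w none (some (-2))
            tok = PySem.Int.toStr n_items ∨ (PySem.Int.ofStr? tok).isSome = true) →
        pvBParse ls ≠ none := by
      intro ls hls
      induction ls with
      | nil => simp [pvBParse]
      | cons l rest ih =>
        have hl := hls l (by simp)
        rw [pvBParse_cons]
        cases hgl : PySem.List.pyGet? (PySem.Str.split₀ l) 1 with
        | none => simp [hgl] at hl
        | some w =>
          have htok : pvTok l = some (PySem.Str.slice w none (some (-2))) := by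
            simp [pvTok, hgl]
          rw [htok]
          have := ih (fun ln hln => hls ln (List.mem_cons_of_mem _ hln))
          cases hp2 : pvBParse rest with
          | none => exact absurd hp2 this
          | some toks => simp
    exact fun hp => this _ hforall hp
  | some toks =>
    have hgood : pvGood (PySem.Int.toStr n_items) toks := by
      intro t ht
      rcases pvBParse_mem _ _ hp t ht with ⟨ln, hln, htok⟩
      have := hforall ln hln
      cases hgl : PySem.List.pyGet? (PySem.Str.split₀ ln) 1 with
      | none => simp [hgl] at this
      | some w =>
        simp only [hgl] at this
        simp [pvTok, hgl] at htok
        subst htok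
        exact this
    rw [hp] at hkey
    simp only [Option.map_some] at hkey
    simp only [hp, hkey, pvGroupTokens_eq_K _ _ hgood, Option.getD_some]
    simp
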